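-- pv_equiv track=rewrite | github.com/jinzhao3611/UMR_Release_2_0 | scripts/format_chinese_1_0.py | find_token_for_concept
-- ===== SOURCE A (Python) =====
-- def find_token_for_concept(concept, words):
--     """
--     Find the token that best matches the concept.
--
--     Args:
--         concept: The concept to match
--         words: List of tokens in the sentence
--
--     Returns:
--         int: The 1-based index of the matching token, or 0 if no match found
--     """
--     # Convert concept to base form (remove hyphens and numbers)
--     base_concept = concept.lower().replace('-', '')
--
--     # First try exact match
--     for i, word in enumerate(words, 1):
--         if word.lower() == base_concept:
--             return i
--
--     # Then try stem/substring matching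
--     for i, word in enumerate(words, 1):
--         word_lower = word.lower()
--         # Check if either is a substring of the other
--         if (base_concept in word_lower or
--             word_lower in base_concept or
--             # Handle common variations (e.g., "take" matching "takes", "taking", etc.)
--             word_lower.startswith(base_concept) or
--             base_concept.startswith(word_lower)):
--             return i
--
--     return 0
-- ===== SOURCE B (Python) =====
-- def find_token_for_concept(concept, words):
--     """Single pass over enumerate(words, 1): return immediately on exact match,
--     remember the first substring/startswith match as a fallback, return it at the end."""
--     base_concept = concept.lower().replace('-', '')
--     first_sub = 0
--     for i, word in enumerate(words, 1):
--         word_lower = word.lower()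
--         if word_lower == base_concept:
--             return i
--         if first_sub == 0 and (base_concept in word_lower or
--                                word_lower in base_concept or
--                                word_lower.startswith(base_concept) or
--                                base_concept.startswith(word_lower)):
--             first_sub = i
--     return first_sub
-- ===== Notes on version B (the rewrite author's own statement) =====
-- stated objective: alternative
-- what changed: Merged A's two sequential scans (exact-match pass, then substring pass) into one pass over enumerate(words, 1) that returns exact matches immediately and retains the first substring match as a fallback variable.
import Mathlib
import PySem

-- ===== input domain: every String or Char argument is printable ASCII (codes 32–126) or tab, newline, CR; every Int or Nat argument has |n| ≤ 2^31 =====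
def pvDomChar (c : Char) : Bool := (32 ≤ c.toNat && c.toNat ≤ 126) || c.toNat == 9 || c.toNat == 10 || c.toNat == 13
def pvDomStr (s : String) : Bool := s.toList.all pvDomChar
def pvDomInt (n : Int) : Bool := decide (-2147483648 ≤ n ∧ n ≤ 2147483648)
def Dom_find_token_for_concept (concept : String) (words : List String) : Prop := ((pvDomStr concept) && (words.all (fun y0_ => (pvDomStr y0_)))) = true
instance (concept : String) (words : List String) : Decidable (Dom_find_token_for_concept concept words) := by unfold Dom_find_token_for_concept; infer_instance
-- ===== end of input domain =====

-- B merges A's two sequential scans into one pass with a retained fallback index (one traversal instead of two).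

-- ===== PORT A =====
-- the substring/startswith disjunction of A's second loop
def ftcSub (base wl : String) : Bool :=
  PySem.Str.isIn base wl || PySem.Str.isIn wl base ||
  PySem.Str.startswith wl base || PySem.Str.startswith base wl

-- A's first loop: exact match, 1-based index i
def ftcScanExact (base : String) (i : Int) : List String → Option Int
  | [] => none
  | w :: ws => if PySem.Str.lower w == base then some i else ftcScanExact base (i + 1) ws

-- A's second loop: substring match, returns 0 when exhausted
def ftcScanSub (base : String) (i : Int) : List String → Int
  | [] => 0
  | w :: ws =>
    let wl := PySem.Str.lower w
    if ftcSub base wl then i else ftcScanSub base (i + 1) ws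

def find_token_for_concept (concept : String) (words : List String) : Int :=
  let base := PySem.Str.replace (PySem.Str.lower concept) "-" ""
  match ftcScanExact base 1 words with
  | some i => i
  | none => ftcScanSub base 1 words

-- ===== PORT B =====
-- single pass: return on exact match, record first substring match once in first_sub
def ftcLoop (base : String) (i first_sub : Int) : List String → Int
  | [] => first_sub
  | w :: ws =>
    let wl := PySem.Str.lower w
    if wl == base then i
    else if first_sub == 0 && ftcSub base wl then ftcLoop base (i + 1) i ws
    else ftcLoop base (i + 1) first_sub ws

def find_token_for_concept_alt (concept : String) (words : List String) : Int :=
  let base := PySem.Str.replace (PySem.Str.lower concept) "-" ""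
  ftcLoop base 1 0 words

-- ===== PRECONDITION & SPEC =====
def Spec_find_token_for_concept (concept : String) (words : List String) (out : Int) : Prop := out = find_token_for_concept_alt concept words
instance (concept : String) (words : List String) (out : Int) : Decidable (Spec_find_token_for_concept concept words out) := by unfold Spec_find_token_for_concept; infer_instance

-- ===== CLAIM (what is proved, stated in full; the proofs are below) =====
def Claim_equal_find_token_for_concept : Prop := ∀ (concept : String) (words : List String), Dom_find_token_for_concept concept words → Spec_find_token_for_concept concept words (find_token_for_concept concept words)

-- ===== LEMMAS AND PROOFS =====

-- once the fallback is set (first_sub ≠ 0), B's loop is just A's exact scan with default first_sub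
theorem ftcLoop_of_ne_zero (base : String) (fs : Int) (hfs : fs ≠ 0) :
    ∀ (ws : List String) (i : Int), ftcLoop base i fs ws = (ftcScanExact base i ws).getD fs := by
  intro ws
  induction ws with
  | nil => intro i; simp [ftcLoop, ftcScanExact]
  | cons w ws ih =>
    intro i
    simp only [ftcLoop, ftcScanExact]
    by_cases h : PySem.Str.lower w == base
    · simp [h]
    · simp [h, hfs, ih]

-- with fallback still 0 and 1 ≤ i, B's loop equals A's two scans composed
theorem ftcLoop_eq_scans (base : String) :
    ∀ (ws : List String) (i : Int), 1 ≤ i →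
      ftcLoop base i 0 ws =
        (match ftcScanExact base i ws with
         | some j => j
         | none => ftcScanSub base i ws) := by
  intro ws
  induction ws with
  | nil => intro i _; simp [ftcLoop, ftcScanExact, ftcScanSub]
  | cons w ws ih =>
    intro i hi
    simp only [ftcLoop, ftcScanExact, ftcScanSub]
    by_cases h : PySem.Str.lower w == base
    · simp [h]
    · by_cases hs : ftcSub base (PySem.Str.lower w)
      · have hi0 : i ≠ 0 := by omega
        simp only [h, hs, Bool.and_true, beq_self_eq_true, if_true,
          Bool.false_eq_true, if_false, ftcLoop_of_ne_zero base i hi0]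
        cases hE : ftcScanExact base (i + 1) ws <;> simp
      · simp only [h, hs, Bool.and_false, Bool.false_eq_true, if_false]
        exact ih (i + 1) (by omega)

-- ===== VERDICT (by name: the statement is the Claim_ definition above) =====
theorem find_token_for_concept_spec : Claim_equal_find_token_for_concept := by
  intro concept words _
  unfold Spec_find_token_for_concept find_token_for_concept find_token_for_concept_alt
  rw [ftcLoop_eq_scans _ words 1 (by omega)]
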